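-- pv_equiv track=rewrite | github.com/vuanhtuan1012/algorithms | high_school/de_ben_tre_2021_2022/bai2.py | tim_doan_ngan_nhat
-- ===== SOURCE A (Python) =====
-- from typing import List, Tuple
--
-- def tim_doan_ngan_nhat(
--     cac_doan_con: List[Tuple[int, List[int]]]
-- ) -> Tuple[int, List[int]]:
--     """
--     Returns the tuple of the index of starting element along with
--     the list of the shortest subsequence
--     """
--     if not cac_doan_con:
--         return 0, 0
--     chi_so, doan_ngan_nhat = cac_doan_con[0]
--     for idx, doan_con in cac_doan_con:
--         if len(doan_con) < len(doan_ngan_nhat):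
--             chi_so = idx
--             doan_ngan_nhat = doan_con
--     return chi_so, doan_ngan_nhat
-- ===== SOURCE B (Python) =====
-- def tim_doan_ngan_nhat(cac_doan_con):
--     """
--     Returns the tuple of the index of starting element along with
--     the list of the shortest subsequence
--     """
--     ordered = sorted(cac_doan_con, key=lambda p: len(p[1]))
--     chi_so, doan_ngan_nhat = ordered[0]
--     return chi_so, doan_ngan_nhat
-- ===== Notes on version B (the rewrite author's own statement) =====
-- stated objective: alternative
-- what changed: Instead of a running-minimum scan, B stably sorts the list by subsequence length and takes the first entry of the sorted list; sort stability reproduces A's strict-less (first-minimum) tie-break.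
-- outside the precondition, e.g. on tim_doan_ngan_nhat([]): A returns (0, 0), B raises IndexError
import Mathlib
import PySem

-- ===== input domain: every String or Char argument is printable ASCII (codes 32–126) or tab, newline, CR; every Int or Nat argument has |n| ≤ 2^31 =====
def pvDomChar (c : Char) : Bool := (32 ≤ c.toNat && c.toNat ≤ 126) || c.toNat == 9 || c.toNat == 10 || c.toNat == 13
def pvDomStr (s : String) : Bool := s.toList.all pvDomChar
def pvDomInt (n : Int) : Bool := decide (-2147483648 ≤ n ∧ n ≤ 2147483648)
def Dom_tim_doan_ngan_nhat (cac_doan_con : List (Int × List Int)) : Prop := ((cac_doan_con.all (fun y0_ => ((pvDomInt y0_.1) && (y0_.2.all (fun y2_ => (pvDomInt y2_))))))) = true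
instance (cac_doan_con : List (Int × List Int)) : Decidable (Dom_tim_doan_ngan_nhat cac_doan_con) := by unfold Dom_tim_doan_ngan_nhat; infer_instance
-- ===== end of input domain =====

-- B replaces A's running-minimum scan by a stable sort on subsequence length followed by taking the first sorted entry (same first-minimum tie-break); alternative algorithm, not faster.


-- ===== PORT A =====
def tim_doan_ngan_nhat (cac_doan_con : List (Int × List Int)) : Int × List Int :=
  match cac_doan_con with
  | [] => (0, [])  -- Python A returns (0, 0): the int 0 is not a list, so the empty input is outside Pre_
  | first :: _ =>
    cac_doan_con.foldl
      (fun acc p => if p.2.length < acc.2.length then (p.1, p.2) else (acc.1, acc.2))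
      (first.1, first.2)

-- ===== PORT B =====
def tim_doan_ngan_nhat_alt (cac_doan_con : List (Int × List Int)) : Int × List Int :=
  match PySem.List.sorted cac_doan_con (fun p => p.2.length) false with
  | m :: _ => (m.1, m.2)
  | [] => (0, [])  -- Python B raises IndexError on []; outside Pre_

-- ===== PRECONDITION & SPEC =====
-- Pre_ excludes only the empty list, on which A returns (0, 0) — the second component an int, not a
-- list of the declared return type — and B's ordered[0] raises IndexError.
def Pre_tim_doan_ngan_nhat (cac_doan_con : List (Int × List Int)) : Prop := cac_doan_con ≠ []
instance (cac_doan_con : List (Int × List Int)) : Decidable (Pre_tim_doan_ngan_nhat cac_doan_con) := by unfold Pre_tim_doan_ngan_nhat; infer_instance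
def pvWitness_tim_doan_ngan_nhat : (List (Int × List Int)) := [(1, [5, 6]), (3, [7])]
def Spec_tim_doan_ngan_nhat (cac_doan_con : List (Int × List Int)) (out : Int × List Int) : Prop := out = tim_doan_ngan_nhat_alt cac_doan_con
instance (cac_doan_con : List (Int × List Int)) (out : Int × List Int) : Decidable (Spec_tim_doan_ngan_nhat cac_doan_con out) := by unfold Spec_tim_doan_ngan_nhat; infer_instance

-- ===== CLAIM =====
def Claim_equal_tim_doan_ngan_nhat : Prop := ∀ (cac_doan_con : List (Int × List Int)), Dom_tim_doan_ngan_nhat cac_doan_con → Pre_tim_doan_ngan_nhat cac_doan_con → Spec_tim_doan_ngan_nhat cac_doan_con (tim_doan_ngan_nhat cac_doan_con)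

-- ===== LEMMAS AND PROOFS =====

-- Inserting into a non-empty stably sorted accumulator changes its head exactly by A's scan update.
theorem head_insertBy (x : Int × List Int) (h : Int × List Int) (t : List (Int × List Int)) :
    PySem.List.insertBy (fun a b : Int × List Int => decide (a.2.length < b.2.length)) x (h :: t)
      = if x.2.length < h.2.length then x :: h :: t
        else h :: PySem.List.insertBy (fun a b : Int × List Int => decide (a.2.length < b.2.length)) x t := by
  simp [PySem.List.insertBy]

-- The head of the left-to-right insertion accumulator is A's scan accumulator.
theorem head_foldl_insert (t : List (Int × List Int)) :
    ∀ (b : Int × List Int) (r : List (Int × List Int)),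
    ∃ r', t.foldl (fun acc x => PySem.List.insertBy (fun a b : Int × List Int => decide (a.2.length < b.2.length)) x acc) (b :: r)
      = (t.foldl (fun acc p => if p.2.length < acc.2.length then (p.1, p.2) else (acc.1, acc.2)) (b.1, b.2)) :: r' := by
  induction t with
  | nil => intro b r; exact ⟨r, rfl⟩
  | cons x t ih =>
    intro b r
    simp only [List.foldl_cons, head_insertBy]
    by_cases h : x.2.length < b.2.length
    · simpa [h] using ih x (b :: r)
    · simpa [h] using ih b (PySem.List.insertBy (fun a b : Int × List Int => decide (a.2.length < b.2.length)) x r)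

-- ===== VERDICT =====
theorem tim_doan_ngan_nhat_spec : Claim_equal_tim_doan_ngan_nhat := by
  intro l _ hpre
  unfold Spec_tim_doan_ngan_nhat
  cases l with
  | nil => exact absurd rfl hpre
  | cons first t =>
    obtain ⟨r', hr⟩ := head_foldl_insert t first []
    simp only [tim_doan_ngan_nhat, tim_doan_ngan_nhat_alt,
      PySem.List.sorted_eq_foldl_insertBy, List.foldl_cons, PySem.List.insertBy, hr,
      lt_self_iff_false, if_false]
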